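-- pv_equiv track=rewrite | github.com/rubenkharel/RKCCipher | RKCCipher.py | encryption_rotation
-- ===== SOURCE A (Python) =====
-- def encryption_rotation(non_rotated_message):
--     if not len(non_rotated_message)%2 == 0:
--         non_rotated_message += " "
--     linewidth=2
--     rotation=""
--     i = 0
--     l=[]
--     for i, x in enumerate(non_rotated_message):
--         if i%linewidth ==0:
--             l.append([])
--         l[-1].append(x)
--     for i in reversed(range(linewidth)):
--         for x in reversed(l):
--             rotation += x[i]
--     return rotation
-- ===== SOURCE B (Python) =====
-- def encryption_rotation(non_rotated_message):
--     padded = non_rotated_message if len(non_rotated_message) % 2 == 0 else non_rotated_message + " "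
--     return padded[1::2][::-1] + padded[0::2][::-1]
-- ===== Notes on version B (the rewrite author's own statement) =====
-- stated objective: simpler
-- what changed: Replaces the enumerate-driven construction of a nested list of 2-char chunks plus a double reversed loop over chunk indices with two stride slices of the padded string (padded[1::2], padded[0::2]) reversed and concatenated.
import Mathlib
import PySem

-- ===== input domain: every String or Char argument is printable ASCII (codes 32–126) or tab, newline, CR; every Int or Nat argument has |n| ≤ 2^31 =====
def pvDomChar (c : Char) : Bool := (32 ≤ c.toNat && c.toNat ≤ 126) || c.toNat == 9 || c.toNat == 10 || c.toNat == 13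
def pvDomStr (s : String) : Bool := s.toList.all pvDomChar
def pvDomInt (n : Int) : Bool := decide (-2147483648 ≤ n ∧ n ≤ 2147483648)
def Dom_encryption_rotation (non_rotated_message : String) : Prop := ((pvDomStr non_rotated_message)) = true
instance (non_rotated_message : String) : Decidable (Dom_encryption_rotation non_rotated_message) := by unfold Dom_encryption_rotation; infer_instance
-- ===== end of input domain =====

-- B replaces A's nested pair-list construction and double reversed loop by two stride
-- slices of the padded string, each reversed and concatenated (simpler, same cost).

-- ===== PORT A =====
def encryption_rotation (non_rotated_message : String) : String :=
  -- if not len(non_rotated_message) % 2 == 0: non_rotated_message += " "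
  let cs := non_rotated_message.toList
  let cs := if ¬ PySem.Int.mod (cs.length : Int) 2 = 0 then cs ++ [' '] else cs
  -- for i, x in enumerate(...): if i % 2 == 0: l.append([]); l[-1].append(x)
  let l := (PySem.List.enumerate cs 0).foldl (fun l ix =>
      let l := if PySem.Int.mod ix.1 2 = 0 then l ++ [([] : List Char)] else l
      l.dropLast ++ [(l.getLast?.getD []) ++ [ix.2]]) []
  -- for i in reversed(range(2)): for x in reversed(l): rotation += x[i]
  let rotation := ((PySem.List.pyRange 0 2 1).reverse).foldl (fun r i =>
      l.reverse.foldl (fun r x => r ++ [PySem.List.pyGetD x i ' ']) r) []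
  String.ofList rotation

-- ===== PORT B =====
def encryption_rotation_alt (non_rotated_message : String) : String :=
  let cs := non_rotated_message.toList
  let padded := if PySem.Int.mod (cs.length : Int) 2 = 0 then cs else cs ++ [' ']
  -- padded[1::2][::-1] + padded[0::2][::-1]
  let odds := (PySem.List.slice? padded (some 1) none 2).getD []
  let evens := (PySem.List.slice? padded none none 2).getD []
  String.ofList (odds.reverse ++ evens.reverse)

-- ===== PRECONDITION & SPEC =====
def Spec_encryption_rotation (non_rotated_message : String) (out : String) : Prop := out = encryption_rotation_alt non_rotated_message
instance (non_rotated_message : String) (out : String) : Decidable (Spec_encryption_rotation non_rotated_message out) := by unfold Spec_encryption_rotation; infer_instance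

-- ===== CLAIM (what is proved, stated in full; the proofs are below) =====
def Claim_equal_encryption_rotation : Prop := ∀ (non_rotated_message : String), Dom_encryption_rotation non_rotated_message → Spec_encryption_rotation non_rotated_message (encryption_rotation non_rotated_message)

-- ===== LEMMAS AND PROOFS =====

-- the list of 2-char chunks A builds (last chunk a singleton for odd input; unreachable after padding)
def pvPairs : List Char → List (List Char)
  | [] => []
  | [a] => [[a]]
  | a :: b :: t => [a, b] :: pvPairs t

-- characters at even / odd positions (what padded[0::2] / padded[1::2] select)
def pvEvens : List Char → List Char
  | [] => []
  | [a] => [a]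
  | a :: _ :: t => a :: pvEvens t

def pvOdds : List Char → List Char
  | [] => []
  | [_] => []
  | _ :: b :: t => b :: pvOdds t

lemma pv_build (cs : List Char) (hl : cs.length % 2 = 0) :
    ∀ (s : Int), s % 2 = 0 → ∀ (acc : List (List Char)),
      (PySem.List.enumerate cs s).foldl (fun l ix =>
          (if PySem.Int.mod ix.1 2 = 0 then l ++ [([] : List Char)] else l).dropLast
            ++ [((if PySem.Int.mod ix.1 2 = 0 then l ++ [([] : List Char)] else l).getLast?.getD []) ++ [ix.2]]) acc = acc ++ pvPairs cs := by
  induction cs using pvPairs.induct with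
  | case1 => simp [PySem.List.enumerate, pvPairs]
  | case2 a => simp at hl
  | case3 a b t ih =>
    intro s hs acc
    have ht : t.length % 2 = 0 := by simp at hl; omega
    rw [PySem.List.enumerate_cons, PySem.List.enumerate_cons]
    simp only [List.foldl_cons]
    have hm0 : PySem.Int.mod s 2 = 0 := by
      rw [PySem.Int.mod_eq_emod_of_pos (by norm_num)]; exact hs
    have hm1 : ¬ PySem.Int.mod (s + 1) 2 = 0 := by
      rw [PySem.Int.mod_eq_emod_of_pos (by norm_num)]; omega
    simp only [hm0, hm1, if_pos, if_false, List.dropLast_concat,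
      List.getLast?_concat, Option.getD_some, List.nil_append]
    rw [show ([a] ++ [b] : List Char) = [a, b] from rfl]
    rw [ih ht (s + 1 + 1) (by omega) (acc ++ [[a, b]])]
    simp [pvPairs]

lemma pv_map_get1 (cs : List Char) (hl : cs.length % 2 = 0) :
    (pvPairs cs).map (fun x => PySem.List.pyGetD x 1 ' ') = pvOdds cs := by
  induction cs using pvPairs.induct with
  | case1 => rfl
  | case2 a => simp at hl
  | case3 a b t ih =>
    have ht : t.length % 2 = 0 := by simp at hl; omega
    simp only [pvPairs, pvOdds, List.map_cons, ih ht, List.cons.injEq, and_true]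
    rfl

lemma pv_map_get0 (cs : List Char) (hl : cs.length % 2 = 0) :
    (pvPairs cs).map (fun x => PySem.List.pyGetD x 0 ' ') = pvEvens cs := by
  induction cs using pvPairs.induct with
  | case1 => rfl
  | case2 a => simp at hl
  | case3 a b t ih =>
    have ht : t.length % 2 = 0 := by simp at hl; omega
    simp only [pvPairs, pvEvens, List.map_cons, ih ht, List.cons.injEq, and_true]
    rfl

lemma pv_slice2_cons2 (a b : Char) (t : List Char) :
    PySem.List.slice? (a :: b :: t) none none 2 = (PySem.List.slice? t none none 2).map (a :: ·) := by
  simp only [PySem.List.slice?, PySem.List.sliceIndices]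
  norm_num
  have hc : (if 0 ≤ (t.length : Int) + 1 then (((t.length : Int) + 1 + 1 + 2 - 1) / 2).toNat else 0)
      = (if 0 < t.length then (((t.length : Int) + 2 - 1) / 2).toNat else 0) + 1 := by
    split_ifs <;> omega
  rw [hc, List.range_succ_eq_map]
  simp only [List.filterMap_cons, List.filterMap_map]
  norm_num
  refine List.filterMap_congr ?_
  intro x hx
  have h2 : (2 * ((x : Int) + 1)).toNat = 2 * x + 2 := by omega
  have h3 : (2 * (x : Int)).toNat = 2 * x := by omega
  rw [h2, h3]
  simp

lemma pv_slice_evens (cs : List Char) :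
    PySem.List.slice? cs none none 2 = some (pvEvens cs) := by
  induction cs using pvEvens.induct with
  | case1 => decide
  | case2 a => simp [PySem.List.slice?, PySem.List.sliceIndices, pvEvens, List.range_succ]
  | case3 a b t ih => rw [pv_slice2_cons2, ih]; rfl

lemma pv_slice1_cons2 (a b : Char) (t : List Char) :
    PySem.List.slice? (a :: b :: t) (some 1) none 2 = (PySem.List.slice? t (some 1) none 2).map (b :: ·) := by
  simp only [PySem.List.slice?, PySem.List.sliceIndices]
  norm_num
  have hmin2 : min (1 : Int) ((t.length : Int) + 1 + 1) = 1 := by omega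
  rcases t with _ | ⟨c, t⟩
  · simp [List.range_succ]
  · have hmin1 : min (1 : Int) (((c :: t).length : Int)) = 1 := by simp
    rw [hmin1, hmin2]
    have hc : ((((c :: t).length : Int) + 1 + 1 - 1 + 2 - 1) / 2).toNat
        = (if 1 < (c :: t).length then (((((c :: t).length : Int)) - 1 + 2 - 1) / 2).toNat else 0) + 1 := by
      simp only [List.length_cons]; split_ifs <;> omega
    rw [hc, List.range_succ_eq_map]
    simp only [List.filterMap_cons, List.filterMap_map]
    norm_num
    refine List.filterMap_congr ?_
    intro x hx
    have h2 : (1 + 2 * ((x : Int) + 1)).toNat = 2 * x + 3 := by omega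
    have h3 : (1 + 2 * (x : Int)).toNat = 2 * x + 1 := by omega
    rw [h2, h3]
    simp

lemma pv_slice_odds (cs : List Char) :
    PySem.List.slice? cs (some 1) none 2 = some (pvOdds cs) := by
  induction cs using pvOdds.induct with
  | case1 => decide
  | case2 a => simp [PySem.List.slice?, PySem.List.sliceIndices, pvOdds]
  | case3 a b t ih => rw [pv_slice1_cons2, ih]; rfl

lemma pv_main (p : List Char) (hp : p.length % 2 = 0) :
    ((PySem.List.pyRange 0 2 1).reverse).foldl (fun r i =>
        ((PySem.List.enumerate p 0).foldl (fun l ix =>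
          (if PySem.Int.mod ix.1 2 = 0 then l ++ [([] : List Char)] else l).dropLast
            ++ [((if PySem.Int.mod ix.1 2 = 0 then l ++ [([] : List Char)] else l).getLast?.getD []) ++ [ix.2]]) []).reverse.foldl
          (fun r x => r ++ [PySem.List.pyGetD x i ' ']) r) []
      = ((PySem.List.slice? p (some 1) none 2).getD []).reverse
        ++ ((PySem.List.slice? p none none 2).getD []).reverse := by
  rw [pv_build p hp 0 (by decide) []]
  have hrange : (PySem.List.pyRange 0 2 1).reverse = [1, 0] := by decide
  rw [hrange, pv_slice_odds, pv_slice_evens]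
  simp only [List.foldl_cons, List.foldl_nil, PySem.List.foldl_append_singleton_eq_map,
    List.nil_append, List.map_reverse, Option.getD_some]
  rw [pv_map_get1 p hp, pv_map_get0 p hp]

-- ===== VERDICT (by name: the statement is the Claim_ definition above) =====
theorem encryption_rotation_spec : Claim_equal_encryption_rotation := by
  intro s _
  unfold Spec_encryption_rotation encryption_rotation encryption_rotation_alt
  by_cases h : PySem.Int.mod (s.toList.length : Int) 2 = 0
  · have hp : s.toList.length % 2 = 0 := by
      rw [PySem.Int.mod_eq_emod_of_pos (by norm_num)] at h; omega
    simp only [h, if_pos, not_true, if_false]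
    rw [pv_main s.toList hp]
  · have hp : (s.toList ++ [' ']).length % 2 = 0 := by
      rw [PySem.Int.mod_eq_emod_of_pos (by norm_num)] at h
      simp only [List.length_append, List.length_cons, List.length_nil]; omega
    simp only [h, if_neg, not_false_iff, if_true]
    rw [pv_main (s.toList ++ [' ']) hp]
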